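-- pv_equiv track=rewrite | github.com/xwoud/Algorithm | programmers/최고의집합.py | solution
-- ===== SOURCE A (Python) =====
-- def solution(n, s):
--     answer = []
--
--     if s < n :
--         return [-1]
--
--     for _ in range(n):
--         answer.append(s//n)
--
--     indexs = len(answer)-1
--
--     for i in range(s - sum(answer)):
--         answer[indexs] += 1
--         indexs -= 1
--
--     return answer
-- ===== SOURCE B (Python) =====
-- def solution(n, s):
--     if s < n:
--         return [-1]
--     answer = []
--     i, rem = n, s
--     while i > 0:
--         v = rem // i
--         answer.append(v)
--         rem -= v
--         i -= 1
--     return answer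
-- ===== Notes on version B (the rewrite author's own statement) =====
-- stated objective: alternative
-- what changed: Replaces A's fill-with-s//n pass plus sum() recomputation plus back-to-front increment loop by a single greedy pass that for i = n down to 1 appends rem//i and subtracts it from rem.
-- crash fix: On n <= 0 with s > 0 A raises IndexError ('answer[-1] += 1' on the empty list) while B's loop never runs and returns []. — e.g. on solution(0, 1): A raises IndexError, B returns []
import Mathlib
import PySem

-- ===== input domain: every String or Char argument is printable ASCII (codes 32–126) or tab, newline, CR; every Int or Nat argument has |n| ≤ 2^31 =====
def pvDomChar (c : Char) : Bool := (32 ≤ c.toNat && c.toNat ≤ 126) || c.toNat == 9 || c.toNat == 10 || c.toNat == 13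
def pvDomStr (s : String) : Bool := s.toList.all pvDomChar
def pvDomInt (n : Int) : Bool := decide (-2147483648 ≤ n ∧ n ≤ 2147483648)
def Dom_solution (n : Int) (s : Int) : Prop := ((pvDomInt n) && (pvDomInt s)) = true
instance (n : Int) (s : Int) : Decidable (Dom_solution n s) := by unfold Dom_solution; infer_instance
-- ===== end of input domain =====

-- B replaces A's fill-then-fix-up (fill with s//n, then a second loop adding 1 to remainder-many
-- slots) by a single greedy pass: repeatedly take rem//i for i = n..1, subtracting as it goes
-- (alternative decomposition; no sum() and no second loop).

-- ===== PORT A =====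
def solution (n : Int) (s : Int) : List Int :=
  if s < n then [-1]
  else
    let answer : List Int :=
      (PySem.List.pyRange 0 n 1).foldl (fun acc _ => acc ++ [PySem.Int.floordiv s n]) []
    let st :=
      (PySem.List.pyRange 0 (s - answer.sum) 1).foldl
        (fun (st : List Int × Int) (_ : Int) =>
          (PySem.List.pySetD st.1 st.2 (PySem.List.pyGetD st.1 st.2 0 + 1), st.2 - 1))
        (answer, (answer.length : Int) - 1)
    st.1

-- ===== PORT B =====
-- the 'while i > 0' greedy loop of Source B, recursion on i
def solutionAltLoop (i : Int) (rem : Int) : List Int :=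
  if _h : 0 < i then
    let v := PySem.Int.floordiv rem i
    v :: solutionAltLoop (i - 1) (rem - v)
  else []
termination_by i.toNat
decreasing_by omega

def solution_alt (n : Int) (s : Int) : List Int :=
  if s < n then [-1]
  else solutionAltLoop n s

-- ===== PRECONDITION & SPEC =====
-- Pre_ excludes exactly the inputs where A raises: n ≤ 0 with s > 0 (A's second loop runs
-- 'answer[-1] += 1' on an empty list → IndexError); A returns normally everywhere else.
def Pre_solution (n : Int) (s : Int) : Prop := 1 ≤ n ∨ s ≤ 0
instance (n : Int) (s : Int) : Decidable (Pre_solution n s) := by unfold Pre_solution; infer_instance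
def pvWitness_solution : Int × Int := (5, 9)

-- On n ≤ 0 with s > 0, A raises IndexError while B's loop simply produces the empty list.
def Raises_solution (n : Int) (s : Int) : Prop := n ≤ 0 ∧ 0 < s
instance (n : Int) (s : Int) : Decidable (Raises_solution n s) := by unfold Raises_solution; infer_instance
def pvRaiseWitness_solution : Int × Int := (0, 1)
def pvRaiseWitnessOut_solution : List Int := []

def Spec_solution (n : Int) (s : Int) (out : List Int) : Prop := out = solution_alt n s
instance (n : Int) (s : Int) (out : List Int) : Decidable (Spec_solution n s out) := by unfold Spec_solution; infer_instance

-- ===== CLAIM (what is proved, stated in full; the proofs are below) =====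
def Claim_equal_solution : Prop := ∀ (n : Int) (s : Int), Dom_solution n s → Pre_solution n s → Spec_solution n s (solution n s)
def Claim_raises_solution : Prop := (∀ (n : Int) (s : Int), Dom_solution n s → Raises_solution n s → ¬ Pre_solution n s) ∧ (Dom_solution (pvRaiseWitness_solution.1) (pvRaiseWitness_solution.2) ∧ Raises_solution (pvRaiseWitness_solution.1) (pvRaiseWitness_solution.2) ∧ solution_alt (pvRaiseWitness_solution.1) (pvRaiseWitness_solution.2) = pvRaiseWitnessOut_solution)

-- ===== LEMMAS AND PROOFS =====

-- one increment step of A's second loop, at the boundary index a of the two blocks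
lemma pv_step (q : Int) (a b : Nat) :
    PySem.List.pySetD (List.replicate (a + 1) q ++ List.replicate b (q + 1)) (a : Int)
      (PySem.List.pyGetD (List.replicate (a + 1) q ++ List.replicate b (q + 1)) (a : Int) 0 + 1)
    = List.replicate a q ++ List.replicate (b + 1) (q + 1) := by
  rw [PySem.List.pySetD_natCast]
  have hget : PySem.List.pyGetD (List.replicate (a + 1) q ++ List.replicate b (q + 1)) (a : Int) 0 = q := by
    rw [PySem.List.pyGetD_natCast]
    simp [List.getD]
    rw [List.getElem?_append_left (by simp)]
    simp
  rw [hget]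
  have h1 : List.replicate (a + 1) q = List.replicate a q ++ [q] := by
    simp [List.replicate_succ']
  rw [h1, List.append_assoc, List.set_append_right]
  · simp [List.replicate_succ]
  · simp

-- r iterations of A's second loop turn the last r copies of q into q+1
lemma pv_loop (q : Int) : ∀ (r m : Nat), r ≤ m →
    ((PySem.List.pyRange 0 (r : Int) 1).foldl
      (fun (st : List Int × Int) (_ : Int) =>
        (PySem.List.pySetD st.1 st.2 (PySem.List.pyGetD st.1 st.2 0 + 1), st.2 - 1))
      (List.replicate m q, (m : Int) - 1))
    = (List.replicate (m - r) q ++ List.replicate r (q + 1), (m : Int) - 1 - r) := by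
  intro r
  induction r with
  | zero => intro m _; simp [PySem.List.pyRange_one_eq_nil]
  | succ r ih =>
    intro m h
    have hc : ((r + 1 : Nat) : Int) = (r : Int) + 1 := by push_cast; ring
    rw [hc, PySem.List.pyRange_one_succ_right (by positivity), List.foldl_append,
        ih m (by omega), List.foldl_cons, List.foldl_nil]
    have hmr : m - r = (m - (r + 1)) + 1 := by omega
    have hidx : (m : Int) - 1 - r = ((m - (r + 1) : Nat) : Int) := by omega
    rw [hmr, hidx]
    dsimp only
    rw [pv_step q (m - (r + 1)) r]
    have h2 : ((m - (r + 1) : Nat) : Int) - 1 = (m : Int) - 1 - ((r : Int) + 1) := by omega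
    rw [h2]

-- the greedy loop realises the q/q+1 block decomposition
lemma pv_greedy : ∀ (m : Nat) (rem q r : Int), rem = q * m + r → 0 ≤ r → r < m →
    solutionAltLoop (m : Int) rem
      = List.replicate (m - r.toNat) q ++ List.replicate r.toNat (q + 1) := by
  intro m
  induction m with
  | zero => intro rem q r _ h0 hlt; omega
  | succ m ih =>
    intro rem q r hrem h0 hlt
    have hpos : (0 : Int) < ((m + 1 : Nat) : Int) := by positivity
    rw [solutionAltLoop, dif_pos hpos]
    have hv : PySem.Int.floordiv rem ((m + 1 : Nat) : Int) = q := by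
      rw [PySem.Int.floordiv_eq_iff_of_pos hpos]
      constructor
      · nlinarith
      · nlinarith
    dsimp only
    rw [hv]
    have hstep : ((m + 1 : Nat) : Int) - 1 = (m : Int) := by push_cast; ring
    rw [hstep]
    by_cases hrm : r < m
    · rw [ih (rem - q) q r (by push_cast at hrem ⊢; ring_nf; ring_nf at hrem; omega) h0 (by exact_mod_cast hrm)]
      have h1 : (m + 1) - r.toNat = ((m - r.toNat) + 1) := by omega
      rw [h1, List.replicate_succ, List.cons_append]
    · have hr : r = (m : Int) := by omega
      by_cases hm0 : m = 0
      · subst hm0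
        have : rem - q = 0 := by simp [hr] at hrem ⊢; omega
        rw [this]
        rw [solutionAltLoop]
        simp [hr]
      · have hrec : rem - q = (q + 1) * (m : Int) + 0 := by
          push_cast at hrem; rw [hr] at hrem; ring_nf; ring_nf at hrem; omega
        rw [ih (rem - q) (q + 1) 0 hrec le_rfl (by exact_mod_cast Nat.pos_of_ne_zero hm0)]
        have h3 : r.toNat = m := by omega
        simp [h3, List.replicate_succ]

-- the greedy loop is empty for nonpositive i
lemma pv_greedy_nil (i rem : Int) (h : i ≤ 0) : solutionAltLoop i rem = [] := by
  rw [solutionAltLoop, dif_neg (by omega)]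

-- ===== VERDICT (by name: the statement is the Claim_ definition above) =====
theorem solution_spec : Claim_equal_solution := by
  intro n s _ hpre
  unfold Spec_solution solution solution_alt
  by_cases hlt : s < n
  · simp [hlt]
  · simp only [if_neg hlt]
    rcases hpre with hn | hs0
    · -- 1 ≤ n, s ≥ n: both sides are the q/q+1 block list
      set q := PySem.Int.floordiv s n with hq
      set r := PySem.Int.mod s n with hr
      have hrpos : 0 ≤ r := PySem.Int.mod_nonneg s (by omega)
      have hrlt : r < n := PySem.Int.mod_lt s (by omega)
      have hans : (PySem.List.pyRange 0 n 1).foldl (fun acc _ => acc ++ [q]) [] =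
          List.replicate n.toNat q := by
        rw [PySem.List.foldl_append_singleton_eq_map, List.map_const', PySem.List.length_pyRange_one]
        simp
      rw [hans]
      have hnn : (n.toNat : Int) = n := by omega
      have hsum : (List.replicate n.toNat q).sum = n * q := by
        rw [List.sum_replicate, nsmul_eq_mul, hnn]
      have hdecomp := PySem.Int.floordiv_mul_add_mod s n
      rw [← hq, ← hr] at hdecomp
      have hsr : s - (List.replicate n.toNat q).sum = r := by
        rw [hsum]; have h4 : n * q = q * n := mul_comm n q; omega
      have hlen : ((List.replicate n.toNat q).length : Int) = (n.toNat : Int) := by simp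
      rw [hsr, hlen]
      have hrcast : r = ((r.toNat : Nat) : Int) := by omega
      rw [hrcast, pv_loop q r.toNat n.toNat (by omega)]
      have hncast : n = (n.toNat : Int) := by omega
      conv_rhs => rw [hncast]
      rw [pv_greedy n.toNat s q r (by rw [hnn]; omega) hrpos (by rw [hnn]; omega)]
    · -- s ≤ 0 and n ≤ s: A's loops are empty, B's loop never runs
      have hn0 : n ≤ 0 := by omega
      have hA : PySem.List.pyRange 0 n 1 = [] := PySem.List.pyRange_one_eq_nil (by omega)
      have hB : PySem.List.pyRange 0 s 1 = [] := PySem.List.pyRange_one_eq_nil (by omega)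
      simp only [hA, List.foldl_nil, List.sum_nil, sub_zero, hB, List.length_nil]
      rw [pv_greedy_nil n s hn0]

theorem solution_raises : Claim_raises_solution := by
  unfold Claim_raises_solution
  refine ⟨by intro n s _ hr; unfold Raises_solution at hr; unfold Pre_solution; omega,
         by decide, by decide, ?_⟩
  show solution_alt 0 1 = []
  unfold solution_alt
  rw [if_neg (by omega)]
  exact pv_greedy_nil 0 1 le_rfl

-- witness self-check: B's port really returns [] at the raise witness
theorem pvRaiseWitness_ok : solution_alt pvRaiseWitness_solution.1 pvRaiseWitness_solution.2 = pvRaiseWitnessOut_solution := solution_raises.2.2.2
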